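-- pv_equiv track=rewrite | github.com/AlimoRabbani/SPOTlight | Device.py | reverse_byte_order
-- ===== SOURCE A (Python) =====
-- def reverse_byte_order(data):
--     dst = hex(data)[2:].replace('L', '')
--     byte_count = len(dst[::2])
--     val = 0
--     for i, n in enumerate(range(byte_count)):
--         d = data & 0xFF
--         val |= (d << (8 * (byte_count - i - 1)))
--         data >>= 8
--     return val
-- ===== SOURCE B (Python) =====
-- def reverse_byte_order(data):
--     byte_count = (len(hex(data)) - 1) // 2
--     masked = data & ((1 << (8 * byte_count)) - 1)
--     return int.from_bytes(masked.to_bytes(byte_count, 'big')[::-1], 'big')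
-- ===== Notes on version B (the rewrite author's own statement) =====
-- stated objective: idiomatic
-- what changed: B computes the byte width once from the hex-string length, masks the low bytes, and reverses them with int.from_bytes(masked.to_bytes(n,'big')[::-1],'big'), replacing A's shift-and-OR accumulator loop over enumerate(range(...)).
import Mathlib
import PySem

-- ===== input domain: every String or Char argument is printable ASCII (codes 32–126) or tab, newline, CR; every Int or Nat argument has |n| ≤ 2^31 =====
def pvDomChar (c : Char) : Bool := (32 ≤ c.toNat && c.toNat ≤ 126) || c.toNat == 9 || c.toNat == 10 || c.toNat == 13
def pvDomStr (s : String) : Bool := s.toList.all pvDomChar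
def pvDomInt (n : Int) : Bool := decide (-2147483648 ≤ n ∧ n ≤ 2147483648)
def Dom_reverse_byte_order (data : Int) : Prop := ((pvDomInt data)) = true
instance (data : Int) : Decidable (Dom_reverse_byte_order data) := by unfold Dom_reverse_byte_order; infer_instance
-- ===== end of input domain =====

-- B derives the byte width from the hex-string length and reverses a big-endian byte
-- buffer (int.from_bytes(masked.to_bytes(n,'big')[::-1],'big')) instead of A's
-- shift-and-OR accumulator loop.

-- ===== PORT A =====
-- hex(data) is not a PySem primitive; built digit by digit, exact for every int
-- (lowercase digits, '-0x…' for negatives, '0x0' for zero — as CPython's hex()).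
def pvHexDigitChar (d : Nat) : Char := if d < 10 then Char.ofNat (48 + d) else Char.ofNat (87 + d)

def pvHexDigitsAux (n : Nat) (acc : List Char) : List Char :=
  if _h : n < 16 then pvHexDigitChar n :: acc
  else pvHexDigitsAux (n / 16) (pvHexDigitChar (n % 16) :: acc)
termination_by n
decreasing_by exact Nat.div_lt_self (by omega) (by norm_num)

def pvHex (n : Int) : List Char :=
  if n < 0 then '-' :: '0' :: 'x' :: pvHexDigitsAux (-n).toNat []
  else '0' :: 'x' :: pvHexDigitsAux n.toNat []

def reverse_byte_order (data : Int) : Int :=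
  -- dst = hex(data)[2:].replace('L', '')
  let dst := PySem.Chars.replace ((pvHex data).drop 2) ['L'] []
  -- byte_count = len(dst[::2])   (a step-2 slice never raises: step ≠ 0)
  let byte_count := ((PySem.List.slice? dst none none 2).getD []).length
  -- val = 0
  -- for i, n in enumerate(range(byte_count)): d = data & 0xFF; val |= d << (8*(byte_count-i-1)); data >>= 8
  let r := (PySem.List.enumerate (PySem.List.pyRange 0 (byte_count : Int) 1) 0).foldl
    (fun (st : Int × Int) (p : Int × Int) =>
      let d := PySem.Int.band st.2 255
      (PySem.Int.bor st.1 (d <<< (8 * ((byte_count : Int) - p.1 - 1)).toNat), st.2 >>> (8 : Nat)))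
    (0, data)
  r.1

-- ===== PORT B =====
def reverse_byte_order_alt (data : Int) : Int :=
  -- byte_count = (len(hex(data)) - 1) // 2
  let byte_count := ((pvHex data).length - 1) / 2
  -- masked = data & ((1 << (8 * byte_count)) - 1)
  let masked := PySem.Int.band data (((1 : Int) <<< (8 * byte_count)) - 1)
  -- masked.to_bytes(byte_count, 'big'): big-endian byte list of a nonnegative int < 256^byte_count (exact here)
  let bytes := (List.range byte_count).map (fun j => (masked.toNat >>> (8 * (byte_count - 1 - j))) % 256)
  -- int.from_bytes(bytes[::-1], 'big')
  bytes.reverse.foldl (fun (acc : Int) (b : Nat) => acc * 256 + (b : Int)) (0 : Int)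

-- ===== PRECONDITION & SPEC =====
def Spec_reverse_byte_order (data : Int) (out : Int) : Prop := out = reverse_byte_order_alt data
instance (data : Int) (out : Int) : Decidable (Spec_reverse_byte_order data out) := by unfold Spec_reverse_byte_order; infer_instance

-- ===== CLAIM (what is proved, stated in full; the proofs are below) =====
def Claim_equal_reverse_byte_order : Prop := ∀ (data : Int), Dom_reverse_byte_order data → Spec_reverse_byte_order data (reverse_byte_order data)

-- ===== LEMMAS AND PROOFS =====

-- ---- byte_count: both sides count one byte per two characters past the '0x' prefix ----

theorem pvHexDigitChar_ne_L {d : Nat} (hd : d < 16) : pvHexDigitChar d ≠ 'L' := by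
  interval_cases d <;> decide

theorem L_not_mem_pvHexDigitsAux (n : Nat) (acc : List Char) (h : 'L' ∉ acc) :
    'L' ∉ pvHexDigitsAux n acc := by
  fun_induction pvHexDigitsAux n acc with
  | case1 n acc hlt =>
    intro hm
    rcases List.mem_cons.1 hm with he | hm2
    · exact pvHexDigitChar_ne_L hlt he.symm
    · exact h hm2
  | case2 n acc hlt ih =>
    refine ih ?_
    intro hm
    rcases List.mem_cons.1 hm with he | hm2
    · exact pvHexDigitChar_ne_L (Nat.mod_lt _ (by norm_num)) he.symm
    · exact h hm2

theorem replace_go_L (fuel : Nat) : ∀ (l acc : List Char), 'L' ∉ l →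
    PySem.Chars.replace.go ['L'] [] fuel l acc = acc.reverse ++ l := by
  induction fuel with
  | zero => intro l acc _; rfl
  | succ fuel ih =>
    intro l acc h
    match l with
    | [] => rw [PySem.Chars.replace.go] <;> simp
    | c :: t =>
      have hc : c ≠ 'L' := fun he => h (by simp [he])
      have hpre : List.isPrefixOf ['L'] (c :: t) = false := by
        simp [List.isPrefixOf]
        intro hh
        exact absurd hh.symm hc
      rw [PySem.Chars.replace.go]
      simp only [hpre]
      rw [ih t (c :: acc) (fun hm => h (List.mem_cons_of_mem _ hm))]
      simp

theorem replace_L_noop (s : List Char) (h : 'L' ∉ s) :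
    PySem.Chars.replace s ['L'] [] = s := by
  rw [PySem.Chars.replace]
  simp only [List.isEmpty_cons, if_false, Bool.false_eq_true]
  exact replace_go_L s.length s [] h

theorem filterMap_len_of_isSome {α β : Type} (f : α → Option β) (l : List α)
    (h : ∀ x ∈ l, (f x).isSome) : (l.filterMap f).length = l.length := by
  induction l with
  | nil => rfl
  | cons a t ih =>
    have := h a (List.mem_cons_self)
    rcases Option.isSome_iff_exists.1 this with ⟨b, hb⟩
    simp [hb, ih (fun x hx => h x (List.mem_cons_of_mem _ hx))]

theorem slice2_len (xs : List Char) :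
    ((PySem.List.slice? xs none none 2).getD []).length = (xs.length + 1) / 2 := by
  simp only [PySem.List.slice?, PySem.List.sliceIndices]
  norm_num
  by_cases h0 : 0 < xs.length
  · rw [if_pos h0]
    have hc : ((↑xs.length + 2 - 1 : Int) / 2).toNat = (xs.length + 1) / 2 := by
      omega
    rw [hc, filterMap_len_of_isSome _ _ ?_, List.length_range]
    intro k hk
    rw [List.mem_range] at hk
    have h2k : (2 * (k : Int)).toNat < xs.length := by omega
    simpa [isSome_getElem?] using h2k
  · rw [if_neg h0]
    simp
    omega

-- the byte count both programs arrive at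
def pvBC (data : Int) : Nat := ((pvHex data).length - 1) / 2

theorem pvHex_L_and_len (data : Int) :
    'L' ∉ (pvHex data).drop 2 ∧ 2 ≤ (pvHex data).length := by
  constructor
  · rw [pvHex]
    by_cases hneg : data < 0
    · rw [if_pos hneg]
      intro hm
      rcases List.mem_cons.1 hm with he | hm2
      · exact absurd he (by decide)
      · exact L_not_mem_pvHexDigitsAux _ _ (by simp) hm2
    · rw [if_neg hneg]
      exact L_not_mem_pvHexDigitsAux _ _ (by simp)
  · rw [pvHex]; split <;> simp

theorem bc_eq (data : Int) :
    ((PySem.List.slice? (PySem.Chars.replace ((pvHex data).drop 2) ['L'] []) none none 2).getD []).length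
      = pvBC data := by
  obtain ⟨hnl, hlen⟩ := pvHex_L_and_len data
  rw [replace_L_noop _ hnl, slice2_len, List.length_drop, pvBC]
  omega

-- ---- bit arithmetic ----

theorem int_band_mask (a : Int) (k : Nat) : PySem.Int.band a ((2 : Int) ^ k - 1) = a % (2 : Int) ^ k := by
  have hpow : ((2 ^ k : Nat) : Int) = (2 : Int) ^ k := by push_cast; rfl
  have hq : (0:Int) < 2 ^ k := by positivity
  have hb : (0:Int) ≤ 2 ^ k - 1 := by omega
  have h1 : ((2:Int) ^ k - 1).toNat = 2 ^ k - 1 := by omega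
  rw [PySem.Int.band]
  by_cases ha : 0 ≤ a
  · rw [if_pos ha, if_pos hb, h1, Nat.and_two_pow_sub_one_eq_mod]
    have h2 : ((a.toNat : Int)) = a := by omega
    push_cast [h2]
    rfl
  · rw [if_neg ha, if_pos hb, h1, Nat.and_comm, Nat.and_two_pow_sub_one_eq_mod]
    set m : Nat := (-a - 1).toNat with hm
    have ham : a = -((m : Int) + 1) := by omega
    have hmod : ((m % 2 ^ k : Nat) : Int) = (m : Int) % 2 ^ k := by push_cast; rfl
    have hrange : 0 ≤ (m : Int) % 2 ^ k ∧ (m : Int) % 2 ^ k < 2 ^ k :=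
      ⟨Int.emod_nonneg _ (by omega), Int.emod_lt_of_pos _ hq⟩
    have ht : (m:Int) - (m:Int) % 2 ^ k = 2 ^ k * ((m:Int) / 2 ^ k) := by
      have := Int.emod_def (m:Int) (2 ^ k)
      linarith
    have hgoal : a % 2 ^ k = 2 ^ k - 1 - (m : Int) % 2 ^ k := by
      have h3 : a = (2 ^ k - 1 - (m : Int) % 2 ^ k) + 2 ^ k * (-((m:Int) / 2 ^ k) - 1) := by
        rw [ham]; ring_nf; linarith [ht]
      rw [h3, Int.add_mul_emod_self_left, Int.emod_eq_of_lt (by omega) (by omega)]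
    rw [hgoal]
    have hlt : m % 2 ^ k < 2 ^ k := Nat.mod_lt _ (by positivity)
    omega

theorem band255 (a : Int) : PySem.Int.band a 255 = a % 256 := by
  have h := int_band_mask a 8
  norm_num at h
  exact h

-- the common value: the low `k` bytes of `d`, lowest byte in the highest lane
def pvRev : Nat → Int → Int
  | 0, _ => 0
  | k + 1, d => PySem.Int.band d 255 * 2 ^ (8 * k) + pvRev k (d >>> (8 : Nat))

theorem emod_mul_ediv (a q : Int) (hq : 0 < q) : (a % (256 * q)) / 256 = (a / 256) % q := by
  have h1 : a = a % (256 * q) + 256 * (q * (a / (256 * q))) := by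
    have := Int.emod_def a (256 * q)
    linarith
  have hr0 : 0 ≤ a % (256 * q) := Int.emod_nonneg _ (by positivity)
  have hr1 : a % (256 * q) < 256 * q := Int.emod_lt_of_pos _ (by positivity)
  have h2 : a / 256 = a % (256 * q) / 256 + q * (a / (256 * q)) := by
    conv_lhs => rw [h1]
    rw [Int.add_mul_ediv_left _ _ (by norm_num : (256:Int) ≠ 0)]
  rw [h2, Int.add_mul_emod_self_left]
  have hd0 : 0 ≤ a % (256 * q) / 256 := Int.ediv_nonneg hr0 (by norm_num)
  have hd1 : a % (256 * q) / 256 < q := by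
    have := Int.ediv_le_ediv (by norm_num : (0:Int) < 256) (le_of_lt hr1)
    have h256q : (256 * q : Int) / 256 = q := by
      rw [Int.mul_ediv_cancel_left _ (by norm_num : (256:Int) ≠ 0)]
    omega
  exact (Int.emod_eq_of_lt hd0 hd1).symm

theorem pvRev_emod (k : Nat) : ∀ (n : Nat) (a : Int), k ≤ n →
    pvRev k (a % 2 ^ (8 * n)) = pvRev k a := by
  induction k with
  | zero => intro n a _; rfl
  | succ k ih =>
    intro n a hkn
    have hn1 : 1 ≤ n := by omega
    have hsplit : (2:Int) ^ (8 * n) = 256 * 2 ^ (8 * (n - 1)) := by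
      have : 8 * n = 8 + 8 * (n - 1) := by omega
      rw [this, pow_add]
      norm_num
    have hqpos : (0:Int) < 2 ^ (8 * (n - 1)) := by positivity
    rw [pvRev, pvRev]
    have hlow : PySem.Int.band (a % 2 ^ (8 * n)) 255 = PySem.Int.band a 255 := by
      rw [band255, band255, hsplit]
      have h256 : (256:Int) ∣ 256 * 2 ^ (8 * (n - 1)) := Dvd.intro _ rfl
      rw [Int.emod_emod_of_dvd _ h256]
    have hshift : (a % 2 ^ (8 * n)) >>> (8:Nat) = (a >>> (8:Nat)) % 2 ^ (8 * (n - 1)) := by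
      rw [Int.shiftRight_eq_div_pow, Int.shiftRight_eq_div_pow, hsplit]
      have h28 : ((2 ^ 8 : Nat) : Int) = 256 := by norm_num
      rw [h28]
      exact emod_mul_ediv a _ hqpos
    rw [hlow, hshift, ih (n - 1) _ (by omega)]

-- ---- A's loop: shift-and-OR accumulation equals pvRev ----

theorem enumerate_pyRange_aux (n : Nat) : ∀ (a : Int),
    PySem.List.enumerate (PySem.List.pyRange a (a + n) 1) a
      = (PySem.List.pyRange a (a + n) 1).map (fun j => (j, j)) := by
  induction n with
  | zero =>
    intro a
    rw [PySem.List.pyRange_one_eq_nil (by omega)]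
    rfl
  | succ n ih =>
    intro a
    rw [PySem.List.pyRange_one_cons (by omega)]
    rw [PySem.List.enumerate_cons, List.map_cons]
    have : a + (n + 1 : Nat) = (a + 1) + (n : Nat) := by push_cast; ring
    rw [this, ih (a + 1)]

theorem bor_shift_add (val x : Int) (kk : Nat) (hval : 0 ≤ val)
    (hmod : val % 2 ^ (8 * (kk + 1)) = 0) (hx0 : 0 ≤ x) (hx : x < 256) :
    PySem.Int.bor val (x <<< (8 * kk)) = val + x * 2 ^ (8 * kk) := by
  have hsh : x <<< (8 * kk) = x * 2 ^ (8 * kk) := by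
    rw [Int.shiftLeft_eq]
  have hpk : (0:Int) < 2 ^ (8 * kk) := by positivity
  have hxk0 : (0:Int) ≤ x * 2 ^ (8 * kk) := by positivity
  have hxklt : x * 2 ^ (8 * kk) < 2 ^ (8 * (kk + 1)) := by
    have h8 : (2:Int) ^ (8 * (kk + 1)) = 256 * 2 ^ (8 * kk) := by
      have h8' : 8 * (kk + 1) = 8 + 8 * kk := by omega
      rw [h8', pow_add]; norm_num
    rw [h8]
    exact mul_lt_mul_of_pos_right hx hpk
  rw [hsh, PySem.Int.bor_of_nonneg hval hxk0]
  have hc2 : ((2 ^ (8 * (kk + 1)) : Nat) : Int) = (2:Int) ^ (8 * (kk + 1)) := by push_cast; rfl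
  have hwv : ((val.toNat : Nat) : Int) = val := Int.toNat_of_nonneg hval
  have hyv : (((x * 2 ^ (8 * kk)).toNat : Nat) : Int) = x * 2 ^ (8 * kk) :=
    Int.toNat_of_nonneg hxk0
  have hwm : val.toNat % 2 ^ (8 * (kk + 1)) = 0 := by
    have hcast : ((val.toNat % 2 ^ (8 * (kk + 1)) : Nat) : Int)
        = ((val.toNat : Nat) : Int) % ((2:Int) ^ (8 * (kk + 1))) := by
      rw [← hc2]
      exact_mod_cast rfl
    have hz : ((val.toNat % 2 ^ (8 * (kk + 1)) : Nat) : Int) = 0 := by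
      rw [hcast, hwv, hmod]
    exact_mod_cast hz
  have hylt : (x * 2 ^ (8 * kk)).toNat < 2 ^ (8 * (kk + 1)) := by
    by_contra hcon
    push Not at hcon
    have hle : ((2 ^ (8 * (kk + 1)) : Nat) : Int) ≤ (((x * 2 ^ (8 * kk)).toNat : Nat) : Int) := by
      exact_mod_cast hcon
    rw [hyv, hc2] at hle
    exact absurd hxklt (not_lt.mpr hle)
  have hweq : val.toNat = (val.toNat / 2 ^ (8 * (kk + 1))) <<< (8 * (kk + 1)) := by
    rw [Nat.shiftLeft_eq]
    exact (Nat.div_mul_cancel (Nat.dvd_of_mod_eq_zero hwm)).symm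
  have hor : val.toNat ||| (x * 2 ^ (8 * kk)).toNat = val.toNat + (x * 2 ^ (8 * kk)).toNat := by
    conv_lhs => rw [hweq]
    conv_rhs => rw [hweq]
    exact (Nat.shiftLeft_add_eq_or_of_lt hylt _).symm
  rw [hor]
  push_cast [hwv, hyv]
  ring

theorem loopA (k : Nat) : ∀ (bc : Nat) (val d : Int), k ≤ bc → 0 ≤ val →
    val % 2 ^ (8 * k) = 0 →
    ((PySem.List.pyRange ((bc : Int) - k) bc 1).foldl
      (fun (st : Int × Int) (j : Int) =>
        (PySem.Int.bor st.1 ((PySem.Int.band st.2 255) <<< (8 * ((bc : Int) - j - 1)).toNat),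
          st.2 >>> (8 : Nat)))
      (val, d)).1 = val + pvRev k d := by
  induction k with
  | zero =>
    intro bc val d _ _ _
    rw [PySem.List.pyRange_one_eq_nil (by omega)]
    simp [pvRev]
  | succ k ih =>
    intro bc val d hk hval hmod
    rw [PySem.List.pyRange_one_cons (by omega : (bc : Int) - (k + 1 : Nat) < bc)]
    rw [List.foldl_cons]
    have hsh : (8 * ((bc : Int) - ((bc : Int) - (k + 1 : Nat)) - 1)).toNat = 8 * k := by
      push_cast
      omega
    have hb255 := band255 d
    have hx0 : 0 ≤ PySem.Int.band d 255 := by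
      rw [hb255]; exact Int.emod_nonneg _ (by norm_num)
    have hxlt : PySem.Int.band d 255 < 256 := by
      rw [hb255]; exact Int.emod_lt_of_pos _ (by norm_num)
    have hbor := bor_shift_add val (PySem.Int.band d 255) k hval hmod hx0 hxlt
    have hstep : ((bc : Int) - (k + 1 : Nat)) + 1 = (bc : Int) - k := by push_cast; ring
    rw [hsh, hbor, hstep]
    have hval' : 0 ≤ val + PySem.Int.band d 255 * 2 ^ (8 * k) := by positivity
    have hmod' : (val + PySem.Int.band d 255 * 2 ^ (8 * k)) % 2 ^ (8 * k) = 0 := by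
      have hdvd : (2:Int) ^ (8 * k) ∣ 2 ^ (8 * (k + 1)) := pow_dvd_pow _ (by omega)
      have h1 : val % 2 ^ (8 * k) = 0 := by
        rw [← Int.emod_emod_of_dvd _ hdvd, hmod]
        simp
      have h2 : (PySem.Int.band d 255 * 2 ^ (8 * k)) % 2 ^ (8 * k) = 0 := Int.mul_emod_left _ _
      rw [Int.add_emod, h1, h2]
      simp
    rw [ih bc _ (d >>> (8:Nat)) (by omega) hval' hmod']
    rw [pvRev]
    ring

-- ---- B's byte buffer: big-endian bytes reversed and re-read equal pvRev ----

theorem foldl_scale (l : List Nat) : ∀ (a : Int),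
    l.foldl (fun (acc : Int) (b : Nat) => acc * 256 + (b : Int)) a
      = a * 256 ^ l.length + l.foldl (fun (acc : Int) (b : Nat) => acc * 256 + (b : Int)) 0 := by
  induction l with
  | nil => intro a; simp
  | cons x t ih =>
    intro a
    rw [List.foldl_cons, List.foldl_cons, ih (a * 256 + (x : Int)), ih ((0:Int) * 256 + (x : Int))]
    simp [List.length_cons]
    ring

theorem fromBytes_rev (bc : Nat) : ∀ (w : Nat),
    (((List.range bc).map (fun j => (w >>> (8 * (bc - 1 - j))) % 256)).reverse.foldl
      (fun (acc : Int) (b : Nat) => acc * 256 + (b : Int)) (0 : Int)) = pvRev bc (w : Int) := by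
  induction bc with
  | zero => intro w; rfl
  | succ bc ih =>
    intro w
    rw [List.range_succ, List.map_append, List.reverse_append]
    simp only [List.map_cons, List.map_nil, List.reverse_cons, List.reverse_nil, List.nil_append,
      List.singleton_append, List.foldl_cons]
    have hmap : (List.range bc).map (fun j => (w >>> (8 * (bc + 1 - 1 - j))) % 256)
        = (List.range bc).map (fun j => ((w >>> 8) >>> (8 * (bc - 1 - j))) % 256) := by
      refine List.map_congr_left ?_
      intro j hj
      rw [List.mem_range] at hj
      have h8 : 8 * (bc + 1 - 1 - j) = 8 + 8 * (bc - 1 - j) := by omega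
      rw [h8, Nat.shiftRight_add]
    have hhead : 8 * (bc + 1 - 1 - bc) = 0 := by omega
    rw [hhead] at *
    simp only [Nat.shiftRight_zero]
    rw [hmap, foldl_scale, ih (w >>> 8)]
    have hlen : ((List.range bc).map (fun j => ((w >>> 8) >>> (8 * (bc - 1 - j))) % 256)).reverse.length = bc := by
      simp
    rw [hlen, pvRev]
    have hband : PySem.Int.band (w : Int) 255 = ((w % 256 : Nat) : Int) := by
      rw [band255]
      push_cast
      rfl
    have hshift : ((w : Int)) >>> (8:Nat) = ((w >>> 8 : Nat) : Int) := by simp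
    have hpw : (256 : Int) ^ bc = 2 ^ (8 * bc) := by
      rw [pow_mul]
      norm_num
    rw [hband, hshift, hpw]
    push_cast
    ring

-- ---- assembly ----

theorem A_eq_pvRev (data : Int) : reverse_byte_order data = pvRev (pvBC data) data := by
  rw [reverse_byte_order]
  simp only [bc_eq]
  have henum := enumerate_pyRange_aux (pvBC data) 0
  simp only [zero_add] at henum
  rw [henum, List.foldl_map]
  have h0 : (0 : Int) = (pvBC data : Int) - (pvBC data : Nat) := by omega
  have := loopA (pvBC data) (pvBC data) 0 data (le_refl _) (le_refl 0) (by simp)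
  rw [h0] at this ⊢
  rw [this]
  ring

theorem B_eq_pvRev (data : Int) : reverse_byte_order_alt data = pvRev (pvBC data) data := by
  rw [reverse_byte_order_alt]
  have hbc : ((pvHex data).length - 1) / 2 = pvBC data := rfl
  simp only [hbc]
  have hone : ((1:Int) <<< (8 * pvBC data)) - 1 = 2 ^ (8 * pvBC data) - 1 := by
    rw [Int.shiftLeft_eq]; ring
  rw [hone, int_band_mask]
  set m : Int := data % 2 ^ (8 * pvBC data) with hmdef
  have hm0 : 0 ≤ m := Int.emod_nonneg _ (by positivity)
  have hcast : ((m.toNat : Nat) : Int) = m := by omega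
  rw [fromBytes_rev (pvBC data) m.toNat, hcast]
  exact pvRev_emod (pvBC data) (pvBC data) data (le_refl _)

-- ===== VERDICT (by name: the statement is the Claim_ definition above) =====
theorem reverse_byte_order_spec : Claim_equal_reverse_byte_order := by
  intro data _
  unfold Spec_reverse_byte_order
  rw [A_eq_pvRev, B_eq_pvRev]
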